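-- pv_equiv track=rewrite | github.com/Mhmdaris15/free-python-project | Regular/Subset terbesar.py | subsetTerbesar
-- ===== SOURCE A (Python) =====
-- def subsetTerbesar(inputList):
--     amountList = len(inputList)
--     result = []
--     list_index = []
--     biggest = 0
--     for i in range(amountList):
--         sums = 0
--         list_index = range(i, amountList, 2)
--         for j in list_index:
--             sums += inputList[j]
--         if sums > biggest:
--             biggest = sums
--         for k in range(amountList):
--             sums = 0
--             if (k != i + 1) and (k != i):
--                 sums = inputList[i] + inputList[k]
--                 if sums > biggest:
--                     biggest = sums
--     return biggest
-- ===== SOURCE B (Python) =====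
-- def subsetTerbesar(inputList):
--     # O(n): backward pass computes every strided sum a[i]+a[i+2]+... via S(i)=a[i]+S(i+2);
--     # the allowed pair sums are exactly all pairs at distinct positions, so their max is
--     # the sum of the two largest values, found in one forward pass.
--     best = 0
--     s1 = 0  # strided sum starting at i+1
--     s2 = 0  # strided sum starting at i+2
--     for x in reversed(inputList):
--         s = x + s2
--         if s > best:
--             best = s
--         s1, s2 = s, s1
--     if len(inputList) >= 2:
--         t1 = None
--         t2 = None
--         for x in inputList:
--             if t1 is None:
--                 t1, t2 = x, None
--             elif t2 is None:
--                 if x > t1: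
--                     t1, t2 = x, t1
--                 else:
--                     t2 = x
--             else:
--                 if x > t1:
--                     t1, t2 = x, t1
--                 elif x > t2:
--                     t2 = x
--         if t1 + t2 > best:
--             best = t1 + t2
--     return best
-- ===== Notes on version B (the rewrite author's own statement) =====
-- stated objective: faster
-- what changed: Replaced the quadratic double loop by two linear passes: a backward pass computing all strided sums via the recurrence S(i)=a[i]+S(i+2), and a forward top-2 scan, since the allowed pair sums are exactly all distinct-position pairs and their maximum is the sum of the two largest values.
import Mathlib
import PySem

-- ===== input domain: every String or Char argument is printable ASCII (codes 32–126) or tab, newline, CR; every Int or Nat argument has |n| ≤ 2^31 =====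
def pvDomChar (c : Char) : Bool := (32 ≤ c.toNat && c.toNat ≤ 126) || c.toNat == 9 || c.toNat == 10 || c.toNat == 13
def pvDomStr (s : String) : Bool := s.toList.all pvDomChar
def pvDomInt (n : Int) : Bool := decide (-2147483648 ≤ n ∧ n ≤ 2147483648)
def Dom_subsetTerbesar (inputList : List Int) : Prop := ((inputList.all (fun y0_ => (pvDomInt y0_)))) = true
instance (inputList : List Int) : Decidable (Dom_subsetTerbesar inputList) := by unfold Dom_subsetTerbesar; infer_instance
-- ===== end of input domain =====

-- B replaces A's O(n^2) double loop by two O(n) passes: a backward pass computing the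
-- strided sums via S(i) = a[i] + S(i+2), and a forward top-2 scan for the best pair sum
-- (the allowed pairs are exactly all distinct-position pairs). Objective: faster.

-- ===== PORT A =====
def subsetTerbesar (inputList : List Int) : Int :=
  let amountList := inputList.length
  (List.range amountList).foldl (fun (biggest : Int) (i : Nat) =>
    let sums := (PySem.List.pyRange (i : Int) (amountList : Int) 2).foldl
        (fun sums j => sums + PySem.List.pyGetD inputList j 0) 0
    let biggest := if sums > biggest then sums else biggest
    (List.range amountList).foldl (fun (biggest : Int) (k : Nat) =>
      if k ≠ i + 1 ∧ k ≠ i then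
        let sums := PySem.List.pyGetD inputList (i : Int) 0 + PySem.List.pyGetD inputList (k : Int) 0
        if sums > biggest then sums else biggest
      else biggest) biggest) 0

-- ===== PORT B =====
-- state: (best, strided sum starting at current index, strided sum starting one later)
def pvStrideStep (st : Int × Int × Int) (x : Int) : Int × Int × Int :=
  let s := x + st.2.2
  (if s > st.1 then s else st.1, s, st.2.1)

-- running top-2: (largest so far, second largest so far), None = not yet seen
def pvTop2Step (t : Option Int × Option Int) (x : Int) : Option Int × Option Int :=
  match t with
  | (none, _) => (some x, none)
  | (some t1, none) => if x > t1 then (some x, some t1) else (some t1, some x)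
  | (some t1, some t2) =>
      if x > t1 then (some x, some t1)
      else if x > t2 then (some t1, some x)
      else (some t1, some t2)

def subsetTerbesar_alt (inputList : List Int) : Int :=
  let st := inputList.reverse.foldl pvStrideStep (0, 0, 0)
  let best := st.1
  if inputList.length ≥ 2 then
    match inputList.foldl pvTop2Step (none, none) with
    | (some t1, some t2) => if t1 + t2 > best then t1 + t2 else best
    | _ => best
  else best

-- ===== PRECONDITION & SPEC =====
def Spec_subsetTerbesar (inputList : List Int) (out : Int) : Prop := out = subsetTerbesar_alt inputList
instance (inputList : List Int) (out : Int) : Decidable (Spec_subsetTerbesar inputList out) := by unfold Spec_subsetTerbesar; infer_instance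

-- ===== CLAIM (what is proved, stated in full; the proofs are below) =====
def Claim_equal_subsetTerbesar : Prop := ∀ (inputList : List Int), Dom_subsetTerbesar inputList → Spec_subsetTerbesar inputList (subsetTerbesar inputList)

-- ===== LEMMAS AND PROOFS =====

theorem pv_if_gt_eq_max (b s : Int) : (if s > b then s else b) = max b s := by
  rw [max_def]; split_ifs <;> omega

-- strided sum taking elements 0, 2, 4, … of a list
def strideSum : List Int → Int
  | [] => 0
  | [x] => x
  | x :: _ :: xs => x + strideSum xs

theorem strideSum_cons (x : Int) (xs : List Int) :
    strideSum (x :: xs) = x + strideSum (xs.drop 1) := by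
  cases xs <;> simp [strideSum]

theorem strideSum_drop (l : List Int) (i : Nat) (h : i < l.length) :
    strideSum (l.drop i) = l.getD i 0 + strideSum (l.drop (i + 2)) := by
  rw [List.drop_eq_getElem_cons h, strideSum_cons, List.drop_drop, List.getD_eq_getElem l 0 h]

theorem pyRange_two_nil (a b : Int) (h : b ≤ a) : PySem.List.pyRange a b 2 = [] := by
  rw [PySem.List.pyRange_of_pos a b (by norm_num)]
  simp [if_neg (by omega : ¬ a < b)]

theorem pyRange_two_cons (a b : Int) (h : a < b) :
    PySem.List.pyRange a b 2 = a :: PySem.List.pyRange (a + 2) b 2 := by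
  rw [PySem.List.pyRange_of_pos a b (by norm_num), PySem.List.pyRange_of_pos (a+2) b (by norm_num)]
  rw [if_pos h]
  have hm : ((b - a + 2 - 1)/2).toNat
      = (if a + 2 < b then ((b - (a+2) + 2 - 1)/2).toNat else 0) + 1 := by
    split_ifs <;> omega
  rw [hm, List.range_succ_eq_map, List.map_cons, List.map_map]
  refine congrArg₂ _ (by ring) (List.map_congr_left fun k _ => ?_)
  simp [Function.comp, Nat.succ_eq_add_one]; ring

theorem strideFold (l : List Int) :
    ∀ (m i : Nat) (acc : Int), l.length - i ≤ m →
      (PySem.List.pyRange (i : Int) (l.length : Int) 2).foldl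
          (fun s j => s + PySem.List.pyGetD l j 0) acc
        = acc + strideSum (l.drop i) := by
  intro m
  induction m with
  | zero =>
    intro i acc h
    have hle : l.length ≤ i := by omega
    rw [pyRange_two_nil _ _ (by exact_mod_cast hle), List.drop_eq_nil_of_le hle]
    simp [strideSum]
  | succ m ih =>
    intro i acc h
    by_cases hi : i < l.length
    · rw [pyRange_two_cons _ _ (by exact_mod_cast hi)]
      have h2 : ((i : Int) + 2) = ((i + 2 : Nat) : Int) := by push_cast; ring
      rw [List.foldl_cons, h2, ih (i + 2) _ (by omega)]
      rw [strideSum_drop l i hi]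
      simp [PySem.List.pyGetD_natCast]
      ring
    · rw [pyRange_two_nil _ _ (by exact_mod_cast Nat.le_of_not_lt hi),
        List.drop_eq_nil_of_le (Nat.le_of_not_lt hi)]
      simp [strideSum]

theorem strideFold0 (l : List Int) (i : Nat) :
    (PySem.List.pyRange (i : Int) (l.length : Int) 2).foldl
        (fun s j => s + PySem.List.pyGetD l j 0) 0
      = strideSum (l.drop i) := by
  rw [strideFold l (l.length) i 0 (by omega)]; ring

-- A's inner k-loop, with the raises written as max
def innerK (l : List Int) (i : Nat) (b : Int) : Int :=
  (List.range l.length).foldl (fun biggest k =>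
    if k ≠ i + 1 ∧ k ≠ i then max biggest (l.getD i 0 + l.getD k 0) else biggest) b

-- A's whole loop in the same normal form
def outerF (l : List Int) (is : List Nat) (b : Int) : Int :=
  is.foldl (fun b i => innerK l i (max b (strideSum (l.drop i)))) b

theorem A_eq (l : List Int) : subsetTerbesar l = outerF l (List.range l.length) 0 := by
  simp only [subsetTerbesar, outerF, innerK, strideFold0, pv_if_gt_eq_max,
    PySem.List.pyGetD_natCast]

-- generic lemmas for a guarded running-max fold
theorem gfold_le {α : Type} (P : α → Prop) [DecidablePred P] (f : α → Int) :
    ∀ (xs : List α) (b : Int),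
      b ≤ xs.foldl (fun b x => if P x then max b (f x) else b) b := by
  intro xs
  induction xs with
  | nil => intro b; simp
  | cons x xs ih =>
    intro b
    refine le_trans ?_ (ih _)
    dsimp only
    split_ifs <;> simp

theorem gfold_ub {α : Type} (P : α → Prop) [DecidablePred P] (f : α → Int) :
    ∀ (xs : List α) (b : Int) (x : α), x ∈ xs → P x →
      f x ≤ xs.foldl (fun b x => if P x then max b (f x) else b) b := by
  intro xs
  induction xs with
  | nil => intro b x hx; simp at hx
  | cons y ys ih =>
    intro b x hx hP
    rcases List.mem_cons.mp hx with h | h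
    · subst h
      refine le_trans ?_ (gfold_le P f ys _)
      dsimp only
      rw [if_pos hP]; exact le_max_right _ _
    · exact ih _ x h hP

theorem gfold_mem {α : Type} (P : α → Prop) [DecidablePred P] (f : α → Int) :
    ∀ (xs : List α) (b : Int),
      xs.foldl (fun b x => if P x then max b (f x) else b) b = b
        ∨ ∃ x ∈ xs, P x ∧ xs.foldl (fun b x => if P x then max b (f x) else b) b = f x := by
  intro xs
  induction xs with
  | nil => intro b; left; rfl
  | cons y ys ih =>
    intro b
    rw [List.foldl_cons]
    rcases ih (if P y then max b (f y) else b) with h | ⟨x, hx, hP, h⟩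
    · rw [h]
      by_cases hPy : P y
      · rw [if_pos hPy]
        rcases max_choice b (f y) with hm | hm
        · left; exact hm
        · right; exact ⟨y, List.mem_cons_self, hPy, hm⟩
      · left; rw [if_neg hPy]
    · right; exact ⟨x, List.mem_cons_of_mem _ hx, hP, h⟩

theorem innerK_le (l : List Int) (i : Nat) (b : Int) : b ≤ innerK l i b :=
  gfold_le _ _ _ _

theorem innerK_ub (l : List Int) (i : Nat) (b : Int) (k : Nat)
    (hk : k < l.length) (h1 : k ≠ i + 1) (h2 : k ≠ i) :
    l.getD i 0 + l.getD k 0 ≤ innerK l i b :=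
  gfold_ub _ _ _ _ k (List.mem_range.mpr hk) ⟨h1, h2⟩

theorem innerK_mem (l : List Int) (i : Nat) (b : Int) :
    innerK l i b = b ∨ ∃ k, k < l.length ∧ k ≠ i + 1 ∧ k ≠ i ∧
      innerK l i b = l.getD i 0 + l.getD k 0 := by
  rcases gfold_mem (fun k => k ≠ i + 1 ∧ k ≠ i) (fun k => l.getD i 0 + l.getD k 0)
      (List.range l.length) b with h | ⟨k, hk, ⟨h1, h2⟩, h⟩
  · left; exact h
  · right; exact ⟨k, List.mem_range.mp hk, h1, h2, h⟩

theorem outerF_le (l : List Int) :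
    ∀ (is : List Nat) (b : Int), b ≤ outerF l is b := by
  intro is
  induction is with
  | nil => intro b; simp [outerF]
  | cons i is ih =>
    intro b
    refine le_trans ?_ (ih _)
    exact le_trans (le_max_left _ _) (innerK_le l i _)

theorem outerF_ub_S (l : List Int) :
    ∀ (is : List Nat) (b : Int) (i : Nat), i ∈ is →
      strideSum (l.drop i) ≤ outerF l is b := by
  intro is
  induction is with
  | nil => intro b i hi; simp at hi
  | cons j js ih =>
    intro b i hi
    rcases List.mem_cons.mp hi with h | h
    · subst h
      refine le_trans ?_ (outerF_le l js _)
      exact le_trans (le_max_right _ _) (innerK_le l i _)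
    · exact ih _ i h

theorem outerF_ub_pair (l : List Int) :
    ∀ (is : List Nat) (b : Int) (i k : Nat), i ∈ is → k < l.length → k ≠ i + 1 → k ≠ i →
      l.getD i 0 + l.getD k 0 ≤ outerF l is b := by
  intro is
  induction is with
  | nil => intro b i k hi; simp at hi
  | cons j js ih =>
    intro b i k hi hk h1 h2
    rcases List.mem_cons.mp hi with h | h
    · subst h
      exact le_trans (innerK_ub l i _ k hk h1 h2) (outerF_le l js _)
    · exact ih _ i k h hk h1 h2

theorem outerF_mem (l : List Int) :
    ∀ (is : List Nat) (b : Int),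
      outerF l is b = b
        ∨ (∃ i ∈ is, outerF l is b = strideSum (l.drop i))
        ∨ (∃ i ∈ is, ∃ k, k < l.length ∧ k ≠ i + 1 ∧ k ≠ i ∧
             outerF l is b = l.getD i 0 + l.getD k 0) := by
  intro is
  induction is with
  | nil => intro b; left; rfl
  | cons j js ih =>
    intro b
    have hstep : outerF l (j :: js) b
        = outerF l js (innerK l j (max b (strideSum (l.drop j)))) := rfl
    rw [hstep]
    rcases ih (innerK l j (max b (strideSum (l.drop j)))) with h | ⟨i, hi, h⟩ | ⟨i, hi, k, hk, h1, h2, h⟩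
    · rcases innerK_mem l j (max b (strideSum (l.drop j))) with h2 | ⟨k, hk, hk1, hk2, h2⟩
      · rcases max_choice b (strideSum (l.drop j)) with hm | hm
        · left; rw [h, h2, hm]
        · right; left; exact ⟨j, List.mem_cons_self, by rw [h, h2, hm]⟩
      · right; right; exact ⟨j, List.mem_cons_self, k, hk, hk1, hk2, by rw [h, h2]⟩
    · right; left; exact ⟨i, List.mem_cons_of_mem _ hi, h⟩
    · right; right; exact ⟨i, List.mem_cons_of_mem _ hi, k, hk, h1, h2, h⟩

-- ===== B-side lemmas =====

theorem loop1 (l : List Int) :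
    (l.foldr (fun x st => pvStrideStep st x) (0, 0, 0)).2.1 = strideSum l
    ∧ (l.foldr (fun x st => pvStrideStep st x) (0, 0, 0)).2.2 = strideSum (l.drop 1)
    ∧ 0 ≤ (l.foldr (fun x st => pvStrideStep st x) (0, 0, 0)).1
    ∧ (∀ i, i < l.length →
        strideSum (l.drop i) ≤ (l.foldr (fun x st => pvStrideStep st x) (0, 0, 0)).1)
    ∧ ((l.foldr (fun x st => pvStrideStep st x) (0, 0, 0)).1 = 0
        ∨ ∃ i, i < l.length ∧
          (l.foldr (fun x st => pvStrideStep st x) (0, 0, 0)).1 = strideSum (l.drop i)) := by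
  induction l with
  | nil =>
    refine ⟨rfl, rfl, le_refl _, ?_, Or.inl rfl⟩
    intro i hi; simp at hi
  | cons x xs ih =>
    obtain ⟨h21, h22, hpos, hub, hmem⟩ := ih
    rw [List.foldr_cons]
    set r := xs.foldr (fun x st => pvStrideStep st x) (0, 0, 0) with hr
    have hs : x + r.2.2 = strideSum (x :: xs) := by
      rw [h22, strideSum_cons]
    constructor
    · simp only [pvStrideStep]; exact hs
    constructor
    · simp only [pvStrideStep]; rw [h21]; rfl
    constructor
    · simp only [pvStrideStep]
      split_ifs with h
      · omega
      · exact hpos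
    constructor
    · intro i hi
      simp only [pvStrideStep]
      match i with
      | 0 =>
        rw [List.drop_zero, ← hs]
        split_ifs with h <;> omega
      | Nat.succ i' =>
        have hi' : i' < xs.length := by simpa using hi
        have := hub i' hi'
        have hd : (x :: xs).drop (i' + 1) = xs.drop i' := rfl
        rw [hd]
        split_ifs with h <;> omega
    · simp only [pvStrideStep]
      split_ifs with h
      · right
        exact ⟨0, by simp, by rw [List.drop_zero, hs]⟩
      · rcases hmem with h0 | ⟨i, hi, he⟩
        · left; exact h0
        · right
          exact ⟨i + 1, by simpa using hi, by rw [he]; rfl⟩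

def top2Inv (p : List Int) : Option Int × Option Int → Prop
  | (none, none) => p = []
  | (some t1, none) => p = [t1]
  | (none, some _) => False
  | (some t1, some t2) =>
      (∃ i j, i < p.length ∧ j < p.length ∧ i ≠ j ∧ p.getD i 0 = t1 ∧ p.getD j 0 = t2)
      ∧ (∀ i, i < p.length → p.getD i 0 ≤ t1)
      ∧ (∀ i j, i < p.length → j < p.length → i ≠ j →
          p.getD i 0 + p.getD j 0 ≤ t1 + t2)

theorem top2_step (p : List Int) (x : Int) (t : Option Int × Option Int)
    (h : top2Inv p t) : top2Inv (p ++ [x]) (pvTop2Step t x) := by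
  obtain ⟨o1, o2⟩ := t
  match o1, o2 with
  | none, none =>
    have hp : p = [] := h
    subst hp
    simp only [pvTop2Step, top2Inv, List.nil_append]
  | none, some t2 => exact absurd h (by simp [top2Inv])
  | some t1, none =>
    have hp : p = [t1] := h
    subst hp
    simp only [pvTop2Step]
    split_ifs with hgt
    · refine ⟨⟨1, 0, by simp, by simp, by omega, by simp, by simp⟩, ?_, ?_⟩
      · intro i hi
        simp at hi
        interval_cases i <;> simp <;> omega
      · intro i j hi hj hij
        simp at hi hj
        interval_cases i <;> interval_cases j <;> simp <;> omega
    · refine ⟨⟨0, 1, by simp, by simp, by omega, by simp, by simp⟩, ?_, ?_⟩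
      · intro i hi
        simp at hi
        interval_cases i <;> simp <;> omega
      · intro i j hi hj hij
        simp at hi hj
        interval_cases i <;> interval_cases j <;> simp <;> omega
  | some t1, some t2 =>
    obtain ⟨⟨i0, j0, hi0, hj0, hij0, hv1, hv2⟩, hub, hpair⟩ := h
    have ht21 : t2 ≤ t1 := by rw [← hv2]; exact hub j0 hj0
    have hlen : (p ++ [x]).length = p.length + 1 := by simp
    have hold : ∀ i, i < p.length → (p ++ [x]).getD i 0 = p.getD i 0 :=
      fun i hi => List.getD_append p [x] 0 i hi
    have hnew : (p ++ [x]).getD p.length 0 = x := by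
      rw [List.getD_append_right p [x] 0 p.length (le_refl _)]
      simp
    simp only [pvTop2Step]
    split_ifs with h1 h2
    · -- x > t1 : new (x, t1)
      refine ⟨⟨p.length, i0, by omega, by omega, by omega, hnew, by rw [hold i0 hi0]; exact hv1⟩, ?_, ?_⟩
      · intro i hi
        rw [hlen] at hi
        by_cases hip : i < p.length
        · rw [hold i hip]; exact le_trans (hub i hip) (le_of_lt h1)
        · have : i = p.length := by omega
          subst this; rw [hnew]
      · intro i j hi hj hij
        rw [hlen] at hi hj
        by_cases hip : i < p.length <;> by_cases hjp : j < p.length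
        · rw [hold i hip, hold j hjp]
          have := hpair i j hip hjp hij
          omega
        · have : j = p.length := by omega
          subst this
          rw [hold i hip, hnew]
          have := hub i hip
          omega
        · have : i = p.length := by omega
          subst this
          rw [hold j hjp, hnew]
          have := hub j hjp
          omega
        · omega
    · -- t2 < x ≤ t1 : new (t1, x)
      refine ⟨⟨i0, p.length, by omega, by omega, by omega, by rw [hold i0 hi0]; exact hv1, hnew⟩, ?_, ?_⟩
      · intro i hi
        rw [hlen] at hi
        by_cases hip : i < p.length
        · rw [hold i hip]; exact hub i hip
        · have : i = p.length := by omega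
          subst this; rw [hnew]; omega
      · intro i j hi hj hij
        rw [hlen] at hi hj
        by_cases hip : i < p.length <;> by_cases hjp : j < p.length
        · rw [hold i hip, hold j hjp]
          have := hpair i j hip hjp hij
          omega
        · have : j = p.length := by omega
          subst this
          rw [hold i hip, hnew]
          have := hub i hip
          omega
        · have : i = p.length := by omega
          subst this
          rw [hold j hjp, hnew]
          have := hub j hjp
          omega
        · omega
    · -- x ≤ t2 ≤ t1 : unchanged
      refine ⟨⟨i0, j0, by omega, by omega, hij0, by rw [hold i0 hi0]; exact hv1, by rw [hold j0 hj0]; exact hv2⟩, ?_, ?_⟩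
      · intro i hi
        rw [hlen] at hi
        by_cases hip : i < p.length
        · rw [hold i hip]; exact hub i hip
        · have : i = p.length := by omega
          subst this; rw [hnew]; omega
      · intro i j hi hj hij
        rw [hlen] at hi hj
        by_cases hip : i < p.length <;> by_cases hjp : j < p.length
        · rw [hold i hip, hold j hjp]
          exact hpair i j hip hjp hij
        · have : j = p.length := by omega
          subst this
          rw [hold i hip, hnew]
          have := hub i hip
          omega
        · have : i = p.length := by omega
          subst this
          rw [hold j hjp, hnew]
          have := hub j hjp
          omega
        · omega

theorem top2_fold :
    ∀ (xs p : List Int) (t : Option Int × Option Int),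
      top2Inv p t → top2Inv (p ++ xs) (xs.foldl pvTop2Step t) := by
  intro xs
  induction xs with
  | nil => intro p t h; simpa using h
  | cons x xs ih =>
    intro p t h
    rw [List.foldl_cons]
    have := ih (p ++ [x]) (pvTop2Step t x) (top2_step p x t h)
    simpa using this

theorem top2_main (l : List Int) : top2Inv l (l.foldl pvTop2Step (none, none)) := by
  have : top2Inv ([] : List Int) (none, none) := rfl
  simpa using top2_fold l [] (none, none) this

-- the four facts about B's value
theorem B_char (l : List Int) :
    0 ≤ subsetTerbesar_alt l
    ∧ (∀ i, i < l.length → strideSum (l.drop i) ≤ subsetTerbesar_alt l)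
    ∧ (∀ i j, i < l.length → j < l.length → i ≠ j →
        l.getD i 0 + l.getD j 0 ≤ subsetTerbesar_alt l)
    ∧ (subsetTerbesar_alt l = 0
        ∨ (∃ i, i < l.length ∧ subsetTerbesar_alt l = strideSum (l.drop i))
        ∨ (∃ i j, i < l.length ∧ j < l.length ∧ i ≠ j ∧
            subsetTerbesar_alt l = l.getD i 0 + l.getD j 0)) := by
  have hrev : l.reverse.foldl pvStrideStep (0, 0, 0)
      = l.foldr (fun x st => pvStrideStep st x) (0, 0, 0) := List.foldl_reverse
  obtain ⟨h21, h22, hpos, hub, hmem⟩ := loop1 l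
  have hinv := top2_main l
  set r := l.foldr (fun x st => pvStrideStep st x) (0, 0, 0) with hrdef
  have hB : subsetTerbesar_alt l
      = (if l.length ≥ 2 then
          (match l.foldl pvTop2Step (none, none) with
            | (some t1, some t2) => if t1 + t2 > r.1 then t1 + t2 else r.1
            | _ => r.1)
        else r.1) := by
    simp only [subsetTerbesar_alt]
    rw [hrev]
  by_cases hlen : l.length ≥ 2
  · rw [if_pos hlen] at hB
    rcases hTv : l.foldl pvTop2Step (none, none) with ⟨o1, o2⟩
    rw [hTv] at hinv hB
    match o1, o2 with
    | none, none =>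
      have : l = [] := hinv
      simp [this] at hlen
    | some t1, none =>
      have : l = [t1] := hinv
      simp [this] at hlen
    | none, some t2 => exact absurd hinv (by simp [top2Inv])
    | some t1, some t2 =>
      obtain ⟨⟨i0, j0, hi0, hj0, hij0, hv1, hv2⟩, hubT, hpairT⟩ := hinv
      have hB' : subsetTerbesar_alt l = if t1 + t2 > r.1 then t1 + t2 else r.1 := hB
      refine ⟨?_, ?_, ?_, ?_⟩
      · rw [hB']; split_ifs with h <;> omega
      · intro i hi
        have := hub i hi
        rw [hB']; split_ifs with h <;> omega
      · intro i j hi hj hij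
        have := hpairT i j hi hj hij
        rw [hB']; split_ifs with h <;> omega
      · rw [hB']; split_ifs with h
        · right; right
          exact ⟨i0, j0, hi0, hj0, hij0, by rw [hv1, hv2]⟩
        · rcases hmem with h0 | ⟨i, hi, he⟩
          · left; exact h0
          · right; left; exact ⟨i, hi, he⟩
  · rw [if_neg hlen] at hB
    refine ⟨by rw [hB]; exact hpos, ?_, ?_, ?_⟩
    · intro i hi
      rw [hB]; exact hub i hi
    · intro i j hi hj hij
      omega
    · rw [hB]
      rcases hmem with h0 | ⟨i, hi, he⟩
      · left; exact h0
      · right; left; exact ⟨i, hi, he⟩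

-- ===== VERDICT (by name: the statement is the Claim_ definition above) =====
theorem subsetTerbesar_spec : Claim_equal_subsetTerbesar := by
  intro l _
  unfold Spec_subsetTerbesar
  obtain ⟨hB0, hBS, hBP, hBmem⟩ := B_char l
  rw [A_eq]
  apply le_antisymm
  · rcases outerF_mem l (List.range l.length) 0 with h | ⟨i, hi, h⟩ | ⟨i, hi, k, hk, h1, h2, h⟩
    · rw [h]; exact hB0
    · rw [h]; exact hBS i (List.mem_range.mp hi)
    · rw [h]; exact hBP i k (List.mem_range.mp hi) hk (Ne.symm h2)
  · rcases hBmem with h | ⟨i, hi, h⟩ | ⟨i, j, hi, hj, hij, h⟩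
    · rw [h]; exact outerF_le l _ 0
    · rw [h]; exact outerF_ub_S l _ 0 i (List.mem_range.mpr hi)
    · rw [h]
      rcases lt_or_gt_of_ne hij with hlt | hgt
      · have := outerF_ub_pair l (List.range l.length) 0 j i (List.mem_range.mpr hj) hi (by omega) (by omega)
        omega
      · have := outerF_ub_pair l (List.range l.length) 0 i j (List.mem_range.mpr hi) hj (by omega) (by omega)
        omega
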